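-- pv_equiv track=rewrite | github.com/JeremyLauret/tdlog_mirrors | lib/Grid.py | get_second_line
-- ===== SOURCE A (Python) =====
-- def get_second_line(Visits, mirror_orientation, first_line_char):
--     """
--        This function is used to set the content of the second line of a given cell in the Grid.display method.
--     """
--
--     k = len(Visits) - 1
--     cont_left = True     # Becomes False if a first character has been found
--     cont_right = True    # Becomes False if a third character has been found
--     first_char = ' '
--     third_char = ' '
--     while((cont_left or cont_right) and k > -1):    # Decreasing order
--         if (cont_left):
--             if (Visits[k][0] == '>'):    # The beam enters through the left
--                 first_char = '>'
--                 cont_left = False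
--             if (Visits[k][1] == '<'):    # The beam exits through the left
--                 first_char = '<'
--                 cont_left = False
--         if (cont_right):
--             if (Visits[k][0] == '<'):    # The beam enters through the right
--                 third_char = '<'
--                 cont_right = False
--             if (Visits[k][1] == '>'):    # The beam exits through the right
--                 third_char = '>'
--                 cont_right = False
--         k -= 1
--     if (mirror_orientation != None):    # The cell contains a mirror
--         second_char = mirror_orientation
--     else:
--         second_char = first_char if first_char != ' ' else first_line_char
--
--     return first_char + second_char + third_char
-- ===== SOURCE B (Python) =====
-- def get_second_line(Visits, mirror_orientation, first_line_char):
--     # Single forward pass: overwrite on every relevant visit, so the last one wins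
--     # (A instead scans backward with flags for the first relevant visit).
--     first_char = ' '
--     third_char = ' '
--     for enter, leave in Visits:
--         if enter == '>' or leave == '<':
--             first_char = '<' if leave == '<' else '>'
--         if enter == '<' or leave == '>':
--             third_char = '>' if leave == '>' else '<'
--     if mirror_orientation is not None:
--         second_char = mirror_orientation
--     else:
--         second_char = first_char if first_char != ' ' else first_line_char
--     return first_char + second_char + third_char
-- ===== Notes on version B (the rewrite author's own statement) =====
-- stated objective: alternative
-- what changed: Replaces A's backward while-loop with continuation flags and early exit by a single forward fold that overwrites the two characters on every relevant visit, so the last relevant visit wins without any reverse traversal or flags.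
import Mathlib
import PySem

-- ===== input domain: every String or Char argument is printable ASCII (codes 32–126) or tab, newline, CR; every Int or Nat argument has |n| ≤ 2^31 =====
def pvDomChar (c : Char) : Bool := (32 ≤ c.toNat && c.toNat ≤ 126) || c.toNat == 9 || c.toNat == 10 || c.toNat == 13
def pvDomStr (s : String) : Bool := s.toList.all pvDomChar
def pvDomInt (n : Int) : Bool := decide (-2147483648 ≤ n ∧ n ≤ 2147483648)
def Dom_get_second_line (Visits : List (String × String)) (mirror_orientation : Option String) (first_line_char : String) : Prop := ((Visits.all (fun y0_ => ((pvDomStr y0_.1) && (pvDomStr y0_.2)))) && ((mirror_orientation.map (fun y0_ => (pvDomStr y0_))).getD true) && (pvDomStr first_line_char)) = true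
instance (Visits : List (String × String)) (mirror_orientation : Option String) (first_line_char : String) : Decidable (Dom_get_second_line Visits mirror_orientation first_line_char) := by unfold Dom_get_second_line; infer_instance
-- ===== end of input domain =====

-- B replaces A's backward flag-controlled while-loop by a single forward fold that
-- overwrites the two characters on every relevant visit (objective: alternative).

-- ===== PORT A =====
-- A's while-loop: k runs len-1 .. 0; fuel n means k = n-1.  Indexing Visits[k] is
-- always in range here (0 ≤ k < len), so List.getD is exact.
def pvLoopA (Visits : List (String × String)) : Nat → Bool → Bool → String → String → String × String
  | 0, _, _, f, t => (f, t)
  | n+1, cl, cr, f, t =>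
    if cl || cr then
      let e := Visits.getD n ("", "")
      let (f, cl) :=
        if cl then
          let (f, cl) := if e.1 = ">" then (">", false) else (f, cl)
          let (f, cl) := if e.2 = "<" then ("<", false) else (f, cl)
          (f, cl)
        else (f, cl)
      let (t, cr) :=
        if cr then
          let (t, cr) := if e.1 = "<" then ("<", false) else (t, cr)
          let (t, cr) := if e.2 = ">" then (">", false) else (t, cr)
          (t, cr)
        else (t, cr)
      pvLoopA Visits n cl cr f t
    else (f, t)

def get_second_line (Visits : List (String × String)) (mirror_orientation : Option String) (first_line_char : String) : String :=
  let (first_char, third_char) := pvLoopA Visits Visits.length true true " " " "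
  let second_char :=
    match mirror_orientation with
    | some m => m
    | none => if first_char ≠ " " then first_char else first_line_char
  first_char ++ second_char ++ third_char

-- ===== PORT B =====
-- loop body of Source B: overwrite on each relevant visit (last relevant visit wins)
def pvStep (acc : String × String) (e : String × String) : String × String :=
  (if e.1 = ">" ∨ e.2 = "<" then (if e.2 = "<" then "<" else ">") else acc.1,
   if e.1 = "<" ∨ e.2 = ">" then (if e.2 = ">" then ">" else "<") else acc.2)

def get_second_line_alt (Visits : List (String × String)) (mirror_orientation : Option String) (first_line_char : String) : String :=
  let (first_char, third_char) := Visits.foldl pvStep (" ", " ")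
  let second_char :=
    match mirror_orientation with
    | some m => m
    | none => if first_char ≠ " " then first_char else first_line_char
  first_char ++ second_char ++ third_char

-- ===== PRECONDITION & SPEC =====
def Spec_get_second_line (Visits : List (String × String)) (mirror_orientation : Option String) (first_line_char : String) (out : String) : Prop := out = get_second_line_alt Visits mirror_orientation first_line_char
instance (Visits : List (String × String)) (mirror_orientation : Option String) (first_line_char : String) (out : String) : Decidable (Spec_get_second_line Visits mirror_orientation first_line_char out) := by unfold Spec_get_second_line; infer_instance

-- ===== CLAIM (what is proved, stated in full; the proofs are below) =====
def Claim_equal_get_second_line : Prop := ∀ (Visits : List (String × String)) (mirror_orientation : Option String) (first_line_char : String), Dom_get_second_line Visits mirror_orientation first_line_char → Spec_get_second_line Visits mirror_orientation first_line_char (get_second_line Visits mirror_orientation first_line_char)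

-- ===== LEMMAS AND PROOFS =====

-- proof-only helpers: the "last relevant visit" character, as a first-match scan of
-- the reversed list; both the backward loop of A and the forward fold of B equal it.
def pvScanFirst : List (String × String) → String
  | [] => " "
  | e :: rest => if e.1 = ">" ∨ e.2 = "<" then (if e.2 = "<" then "<" else ">") else pvScanFirst rest

def pvScanThird : List (String × String) → String
  | [] => " "
  | e :: rest => if e.1 = "<" ∨ e.2 = ">" then (if e.2 = ">" then ">" else "<") else pvScanThird rest

lemma pvLoopA_eq (Visits : List (String × String)) :
    ∀ (n : Nat), n ≤ Visits.length → ∀ (cl cr : Bool) (f t : String),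
    pvLoopA Visits n cl cr f t =
      ((if cl then (if pvScanFirst (Visits.take n).reverse = " " then f
                    else pvScanFirst (Visits.take n).reverse) else f),
       (if cr then (if pvScanThird (Visits.take n).reverse = " " then t
                    else pvScanThird (Visits.take n).reverse) else t)) := by
  intro n
  induction n with
  | zero =>
    intro _ cl cr f t
    cases cl <;> cases cr <;> simp [pvLoopA, pvScanFirst, pvScanThird]
  | succ n ih =>
    intro hn cl cr f t
    have hn' : n ≤ Visits.length := Nat.le_of_succ_le hn
    have hlt : n < Visits.length := Nat.lt_of_lt_of_le (Nat.lt_succ_self n) hn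
    have hget : Visits.getD n ("", "") = Visits[n] := List.getD_eq_getElem _ _ hlt
    have htake : (Visits.take (n+1)).reverse = Visits[n] :: (Visits.take n).reverse := by
      rw [List.take_add_one, List.getElem?_eq_getElem hlt]
      simp
    cases cl <;> cases cr
    · simp [pvLoopA]
    · simp only [pvLoopA, Bool.false_or, hget, htake]
      by_cases h1 : (Visits[n] : String × String).1 = "<" <;>
      by_cases h2 : (Visits[n] : String × String).2 = ">" <;>
        simp [h1, h2, ih hn', pvScanThird]
    · simp only [pvLoopA, Bool.or_false, hget, htake]
      by_cases h1 : (Visits[n] : String × String).1 = ">" <;>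
      by_cases h2 : (Visits[n] : String × String).2 = "<" <;>
        simp [h1, h2, ih hn', pvScanFirst]
    · simp only [pvLoopA, Bool.or_self, hget, htake]
      by_cases h1 : (Visits[n] : String × String).1 = ">" <;>
      by_cases h2 : (Visits[n] : String × String).2 = "<" <;>
      by_cases h3 : (Visits[n] : String × String).1 = "<" <;>
      by_cases h4 : (Visits[n] : String × String).2 = ">" <;>
        simp [h1, h2, h3, h4, ih hn', pvScanFirst, pvScanThird]

lemma pvFoldB_eq (Visits : List (String × String)) : ∀ (f t : String),
    Visits.foldl pvStep (f, t) =
      ((if pvScanFirst Visits.reverse = " " then f else pvScanFirst Visits.reverse),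
       (if pvScanThird Visits.reverse = " " then t else pvScanThird Visits.reverse)) := by
  induction Visits using List.reverseRecOn with
  | nil => intro f t; simp [pvScanFirst, pvScanThird]
  | append_singleton ys e ih =>
    intro f t
    rw [List.foldl_append, ih]
    by_cases h1 : e.1 = ">" <;> by_cases h2 : e.2 = "<" <;>
    by_cases h3 : e.1 = "<" <;> by_cases h4 : e.2 = ">" <;>
      simp [pvStep, pvScanFirst, pvScanThird, h1, h2, h3, h4]

-- ===== VERDICT (by name: the statement is the Claim_ definition above) =====
theorem get_second_line_spec : Claim_equal_get_second_line := by
  intro Visits mo flc _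
  unfold Spec_get_second_line get_second_line get_second_line_alt
  rw [pvLoopA_eq Visits Visits.length le_rfl true true " " " ", List.take_length,
    pvFoldB_eq Visits " " " "]
  simp
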